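-- pv_equiv track=rewrite | github.com/frankenberga/Robotics-Motion-Planning | Workspace.py | calculate_lines
-- ===== SOURCE A (Python) =====
-- def calculate_lines(coords):
--     lines = []
--     elem = 0
--     while elem < len(coords):
--         line = []
--         if elem == 0:
--             start = (0, 0)
--             line.append(start)
--             line.append(coords[elem])
--         else:
--             line.append(coords[elem - 1])
--             line.append(coords[elem])
--         lines.append(line)
--         elem += 1
--     return lines
-- ===== SOURCE B (Python) =====
-- def calculate_lines(coords):
--     def go(prev, rest):
--         if not rest:
--             return []
--         return [[prev, rest[0]]] + go(rest[0], rest[1:])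
--     return go((0, 0), list(coords))
-- ===== Notes on version B (the rewrite author's own statement) =====
-- stated objective: alternative
-- what changed: B is a structural recursion on the point list that carries the previous point as an accumulator (seeded with the origin), instead of A's index-driven while loop with an elem==0 special case and repeated indexing.
import Mathlib
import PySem

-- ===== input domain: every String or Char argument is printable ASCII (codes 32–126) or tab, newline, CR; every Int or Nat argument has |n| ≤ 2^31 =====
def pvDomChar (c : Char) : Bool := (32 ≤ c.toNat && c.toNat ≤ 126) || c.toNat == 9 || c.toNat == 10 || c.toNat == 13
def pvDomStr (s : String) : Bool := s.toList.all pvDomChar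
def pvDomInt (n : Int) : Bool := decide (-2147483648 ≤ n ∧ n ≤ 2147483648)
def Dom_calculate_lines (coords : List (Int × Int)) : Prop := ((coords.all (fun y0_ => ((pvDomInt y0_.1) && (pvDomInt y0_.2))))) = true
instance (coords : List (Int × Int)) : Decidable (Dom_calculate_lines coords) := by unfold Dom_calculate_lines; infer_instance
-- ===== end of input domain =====

-- B replaces A's index-driven while loop (with its elem==0 special case) by a structural recursion on the list carrying the previous point as an accumulator (same cost, different decomposition).


-- ===== PORT A =====
-- A's while loop over the index `elem`, transliterated as recursion on the index;
-- coords[elem] and coords[elem-1] are always in range under the loop guard, so getD never uses its default.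
def calculate_lines_loop (coords : List (Int × Int)) (elem : Nat) (lines : List (List (Int × Int))) :
    List (List (Int × Int)) :=
  if elem < coords.length then
    let line : List (Int × Int) :=
      if elem = 0 then [((0 : Int), (0 : Int)), coords.getD elem (0, 0)]
      else [coords.getD (elem - 1) (0, 0), coords.getD elem (0, 0)]
    calculate_lines_loop coords (elem + 1) (lines ++ [line])
  else lines
termination_by coords.length - elem

def calculate_lines (coords : List (Int × Int)) : List (List (Int × Int)) :=
  calculate_lines_loop coords 0 []

-- ===== PORT B =====
-- Source B's inner `go`: structural recursion on the remaining points, carrying the previous point.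
def calculate_lines_go (prev : Int × Int) (rest : List (Int × Int)) : List (List (Int × Int)) :=
  match rest with
  | [] => []
  | x :: xs => [prev, x] :: calculate_lines_go x xs

def calculate_lines_alt (coords : List (Int × Int)) : List (List (Int × Int)) :=
  calculate_lines_go ((0 : Int), (0 : Int)) coords

-- ===== PRECONDITION & SPEC =====
def Spec_calculate_lines (coords : List (Int × Int)) (out : List (List (Int × Int))) : Prop := out = calculate_lines_alt coords
instance (coords : List (Int × Int)) (out : List (List (Int × Int))) : Decidable (Spec_calculate_lines coords out) := by unfold Spec_calculate_lines; infer_instance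

-- ===== CLAIM (what is proved, stated in full; the proofs are below) =====
def Claim_equal_calculate_lines : Prop := ∀ (coords : List (Int × Int)), Dom_calculate_lines coords → Spec_calculate_lines coords (calculate_lines coords)

-- ===== LEMMAS AND PROOFS =====

-- the i-th line of A's output
def lineAt (coords : List (Int × Int)) (i : Nat) : List (Int × Int) :=
  if i = 0 then [((0 : Int), (0 : Int)), coords.getD i (0, 0)]
  else [coords.getD (i - 1) (0, 0), coords.getD i (0, 0)]

theorem loop_eq (coords : List (Int × Int)) :
    ∀ elem lines, calculate_lines_loop coords elem lines =
      lines ++ (List.range' elem (coords.length - elem)).map (lineAt coords) := by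
  intro elem
  induction h : coords.length - elem using Nat.strong_induction_on generalizing elem with
  | _ n ih =>
    intro lines
    rw [calculate_lines_loop]
    by_cases hlt : elem < coords.length
    · have hn : n = (coords.length - (elem + 1)) + 1 := by omega
      rw [if_pos hlt, ih (coords.length - (elem + 1)) (by omega) (elem + 1) rfl]
      subst hn
      rw [List.range'_succ, List.map_cons, List.append_assoc]
      simp [lineAt]
    · rw [if_neg hlt]
      have hn0 : n = 0 := by omega
      subst hn0
      simp

-- B's recursion is the consecutive-pairs zip of prev::rest with rest
theorem go_zip (prev : Int × Int) (rest : List (Int × Int)) :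
    calculate_lines_go prev rest =
      List.zipWith (fun a b => [a, b]) (prev :: rest) rest := by
  induction rest generalizing prev with
  | nil => rfl
  | cons x xs ih => simp [calculate_lines_go, ih x]

theorem alt_eq (coords : List (Int × Int)) :
    calculate_lines_alt coords = (List.range' 0 coords.length).map (lineAt coords) := by
  rw [calculate_lines_alt, go_zip]
  apply List.ext_getElem
  · simp
  · intro i h1 h2
    have hi : i < coords.length := by simpa using h2
    simp only [List.getElem_zipWith, List.getElem_map, List.getElem_range', Nat.zero_add]
    cases i with
    | zero => simp [lineAt, List.getD, List.getElem?_eq_getElem hi]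
    | succ j =>
      have hj : j < coords.length := by omega
      simp [lineAt, List.getD, List.getElem?_eq_getElem hi, List.getElem?_eq_getElem hj]

-- ===== VERDICT (by name: the statement is the Claim_ definition above) =====
theorem calculate_lines_spec : Claim_equal_calculate_lines := by
  intro coords _
  show calculate_lines coords = calculate_lines_alt coords
  rw [calculate_lines, loop_eq, alt_eq]
  simp
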